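-- pv_equiv track=rewrite | github.com/siryofat/adventjs_2025 | python/reto13.py | run_factory
-- ===== SOURCE A (Python) =====
-- def run_factory(factory: list[str]) -> str:
--     rows = len(factory)
--     cols = len(factory[0])
--
--     MOV = {">": (0, 1), "<": (0, -1), "v": (1, 0), "^": (-1, 0)}
--
--     r = 0
--     c = 0
--
--     seen = set()
--     while True:
--         if (r, c) in seen:
--             return "loop"
--         else:
--             seen.add((r, c))
--
--         pos = factory[r][c]
--         if pos == ".":
--             return "completed"
--
--         dr, dc = MOV[pos]
--         r += dr
--         c += dc
--         if not (0 <= r < rows and 0 <= c < cols):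
--             return "broken"
-- ===== SOURCE B (Python) =====
-- def run_factory(factory: list[str]) -> str:
--     rows = len(factory)
--     cols = len(factory[0])
--     arrows = {">": (0, 1), "<": (0, -1), "v": (1, 0), "^": (-1, 0)}
--
--     def step(r, c):
--         ch = factory[r][c]
--         if ch == ".":
--             return "completed"
--         dr, dc = arrows[ch]
--         r, c = r + dr, c + dc
--         if 0 <= r < rows and 0 <= c < cols:
--             return (r, c)
--         return "broken"
--
--     state = (0, 0)
--     for _ in range(rows * cols):
--         state = step(*state)
--         if isinstance(state, str):
--             return state
--     return "loop"
-- ===== Notes on version B (the rewrite author's own statement) =====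
-- stated objective: alternative
-- what changed: Replaces A's visited-set loop with a pure step function iterated at most rows*cols times: by pigeonhole a walk that survives rows*cols steps without reaching '.' or leaving the grid must revisit a cell, so no seen-set is maintained.
-- outside the precondition, e.g. on run_factory(['>.x']): A returns 'completed', B returns 'completed'; on run_factory(['v', '.x']): A returns 'completed', B returns 'completed'
import Mathlib
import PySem

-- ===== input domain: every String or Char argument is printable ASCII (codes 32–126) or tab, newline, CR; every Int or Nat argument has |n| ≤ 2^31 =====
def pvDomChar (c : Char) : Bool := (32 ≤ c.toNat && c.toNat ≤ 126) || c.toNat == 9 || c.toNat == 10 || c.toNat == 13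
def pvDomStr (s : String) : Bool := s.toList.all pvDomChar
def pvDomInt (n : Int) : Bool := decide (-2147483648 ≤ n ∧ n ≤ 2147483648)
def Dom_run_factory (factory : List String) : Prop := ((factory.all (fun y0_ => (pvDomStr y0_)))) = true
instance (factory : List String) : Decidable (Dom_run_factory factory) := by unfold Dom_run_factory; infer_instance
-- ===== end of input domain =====

-- B replaces A's visited-set loop by a pure step function iterated at most rows*cols times
-- (pigeonhole: a path that survives rows*cols steps must revisit a cell); objective: alternative.

-- ===== PORT A =====
-- A's while-True loop with the seen set; `fuel` is only a termination guard
-- (rows*cols + 1 is never exhausted on Pre_ inputs, as the equivalence proof below shows).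
def runLoopA (factory : List String) (rows cols : Int) (mov : PySem.Dict Char (Int × Int))
    (fuel : Nat) (seen : PySem.Set (Int × Int)) (r c : Int) : String :=
  match fuel with
  | 0 => "loop"
  | fuel + 1 =>
    if PySem.Set.contains seen (r, c) then "loop"
    else
      let seen' := PySem.Set.add seen (r, c)
      -- factory[r][c]: Python raises IndexError when out of range (excluded by Pre_); the default ' ' is never read inside Pre_
      let pos := (PySem.Str.pyGet? (PySem.List.pyGetD factory r "") c).getD ' '
      if pos = '.' then "completed"
      else
        -- MOV[pos]: Python raises KeyError on any other character (excluded by Pre_); default never read inside Pre_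
        let d := (PySem.Dict.get? mov pos).getD (0, 0)
        let r' := r + d.1
        let c' := c + d.2
        if 0 ≤ r' ∧ r' < rows ∧ 0 ≤ c' ∧ c' < cols then
          runLoopA factory rows cols mov fuel seen' r' c'
        else "broken"

def run_factory (factory : List String) : String :=
  let rows : Int := factory.length
  -- cols = len(factory[0]): Python raises IndexError on an empty list (excluded by Pre_)
  let cols : Int := PySem.Str.len (PySem.List.pyGetD factory 0 "")
  -- the 1-character cells are modelled as Char, so MOV is keyed by Char
  let mov : PySem.Dict Char (Int × Int) :=
    PySem.Dict.ofList [('>', (0, 1)), ('<', (0, -1)), ('v', (1, 0)), ('^', (-1, 0))]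
  runLoopA factory rows cols mov ((rows * cols).toNat + 1) PySem.Set.empty 0 0

-- ===== PORT B =====
-- B's step: maps a state to the terminal answer or to the next state (Source B's `step`).
def stepB (factory : List String) (rows cols : Int) (arrows : PySem.Dict Char (Int × Int))
    (st : Int × Int) : Sum String (Int × Int) :=
  -- factory[r][c] / arrows[ch]: Python raises outside Pre_; the defaults are never read inside Pre_
  let ch := (PySem.Str.pyGet? (PySem.List.pyGetD factory st.1 "") st.2).getD ' '
  if ch = '.' then Sum.inl "completed"
  else
    let d := (PySem.Dict.get? arrows ch).getD (0, 0)
    let r := st.1 + d.1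
    let c := st.2 + d.2
    if 0 ≤ r ∧ r < rows ∧ 0 ≤ c ∧ c < cols then Sum.inr (r, c) else Sum.inl "broken"

-- Source B's `for _ in range(rows * cols)` loop over the state
def runLoopB (factory : List String) (rows cols : Int) (arrows : PySem.Dict Char (Int × Int)) :
    Nat → (Int × Int) → String
  | 0, _ => "loop"
  | n + 1, st =>
    match stepB factory rows cols arrows st with
    | Sum.inl res => res
    | Sum.inr st' => runLoopB factory rows cols arrows n st'

def run_factory_alt (factory : List String) : String :=
  let rows : Int := factory.length
  let cols : Int := PySem.Str.len (PySem.List.pyGetD factory 0 "")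
  let arrows : PySem.Dict Char (Int × Int) :=
    PySem.Dict.ofList [('>', (0, 1)), ('<', (0, -1)), ('v', (1, 0)), ('^', (-1, 0))]
  runLoopB factory rows cols arrows (rows * cols).toNat (0, 0)

-- ===== PRECONDITION & SPEC =====
-- A returns normally exactly when the walk from (0,0) never hits a missing cell or a character
-- outside '><v^.' — a path-dependent fact with no closed form.  Pre_ therefore admits the two
-- closed-form families where A provably returns: grids whose start cell terminates the walk at
-- once ('.' completes; '<'/'^', '>' on a 1-column grid, 'v' on a 1-row grid break out), and fully
-- well-formed grids (rectangular, every cell in '><v^.').  Grids outside these families on which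
-- A happens to return (the bad cell lies off the walked path) are excluded — see claim.json cites.
def Pre_run_factory (factory : List String) : Prop :=
  factory ≠ [] ∧
  0 < (factory.headD "").toList.length ∧
  ((factory.headD "").toList.headD ' ' = '.' ∨
   (factory.headD "").toList.headD ' ' = '<' ∨
   (factory.headD "").toList.headD ' ' = '^' ∨
   ((factory.headD "").toList.headD ' ' = '>' ∧ (factory.headD "").toList.length = 1) ∨
   ((factory.headD "").toList.headD ' ' = 'v' ∧ factory.length = 1) ∨
   ((factory.all (fun row => row.toList.length == (factory.headD "").toList.length)) = true ∧
    (factory.all (fun row => row.toList.all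
      (fun ch => ch == '>' || ch == '<' || ch == 'v' || ch == '^' || ch == '.'))) = true))
instance (factory : List String) : Decidable (Pre_run_factory factory) := by
  unfold Pre_run_factory; infer_instance

def pvWitness_run_factory : List String := ["v.", ">^"]

def Spec_run_factory (factory : List String) (out : String) : Prop := out = run_factory_alt factory
instance (factory : List String) (out : String) : Decidable (Spec_run_factory factory out) := by
  unfold Spec_run_factory; infer_instance

-- ===== CLAIM (what is proved, stated in full; the proofs are below) =====
def Claim_equal_run_factory : Prop := ∀ (factory : List String), Dom_run_factory factory → Pre_run_factory factory → Spec_run_factory factory (run_factory factory)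

-- ===== LEMMAS AND PROOFS =====

-- a state inside the grid
def InB (rows cols : Int) (s : Int × Int) : Prop :=
  0 ≤ s.1 ∧ s.1 < rows ∧ 0 ≤ s.2 ∧ s.2 < cols

-- A's loop body, one unfolding, expressed through B's step function
lemma runLoopA_succ (factory : List String) (rows cols : Int) (mov : PySem.Dict Char (Int × Int))
    (fuel : Nat) (seen : PySem.Set (Int × Int)) (r c : Int) :
    runLoopA factory rows cols mov (fuel + 1) seen r c =
      if PySem.Set.contains seen (r, c) then "loop"
      else
        match stepB factory rows cols mov (r, c) with
        | Sum.inl res => res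
        | Sum.inr st' => runLoopA factory rows cols mov fuel (PySem.Set.add seen (r, c)) st'.1 st'.2 := by
  simp only [runLoopA, stepB]
  split_ifs <;> rfl

-- a state produced by stepB is inside the grid
lemma stepB_inr_inB (factory : List String) (rows cols : Int) (arrows : PySem.Dict Char (Int × Int))
    (st s' : Int × Int) (h : stepB factory rows cols arrows st = Sum.inr s') :
    InB rows cols s' := by
  unfold stepB at h
  by_cases h1 : (PySem.Str.pyGet? (PySem.List.pyGetD factory st.1 "") st.2).getD ' ' = '.'
  · simp only [h1, if_true] at h
    cases h
  · simp only [h1, if_false] at h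
    by_cases h2 : 0 ≤ st.1 + ((arrows.get? ((PySem.Str.pyGet? (PySem.List.pyGetD factory st.1 "") st.2).getD ' ')).getD (0, 0)).1 ∧
        st.1 + ((arrows.get? ((PySem.Str.pyGet? (PySem.List.pyGetD factory st.1 "") st.2).getD ' ')).getD (0, 0)).1 < rows ∧
        0 ≤ st.2 + ((arrows.get? ((PySem.Str.pyGet? (PySem.List.pyGetD factory st.1 "") st.2).getD ' ')).getD (0, 0)).2 ∧
        st.2 + ((arrows.get? ((PySem.Str.pyGet? (PySem.List.pyGetD factory st.1 "") st.2).getD ' ')).getD (0, 0)).2 < cols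
    · simp only [h2] at h
      cases h
      exact h2
    · simp only [h2, if_false] at h
      cases h

-- inside a step-closed set of states, B's loop never finds a terminal: it exhausts its counter
lemma runLoopB_closed (factory : List String) (rows cols : Int) (arrows : PySem.Dict Char (Int × Int))
    (S : List (Int × Int))
    (hS : ∀ x ∈ S, ∃ y ∈ S, stepB factory rows cols arrows x = Sum.inr y) :
    ∀ (n : Nat) (st : Int × Int), st ∈ S → runLoopB factory rows cols arrows n st = "loop" := by
  intro n
  induction n with
  | zero => intro st _; rfl
  | succ n ih =>
    intro st hst
    obtain ⟨y, hy, hstep⟩ := hS st hst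
    simp only [runLoopB, hstep]
    exact ih y hy

-- if the end of a step-chain re-enters the chain, the set of its states is step-closed
lemma chain_closed (factory : List String) (rows cols : Int) (arrows : PySem.Dict Char (Int × Int))
    (path : List (Int × Int)) (s : Int × Int)
    (hchain : List.IsChain (fun a b => stepB factory rows cols arrows a = Sum.inr b) (path ++ [s]))
    (hs : s ∈ path) :
    ∀ x ∈ path ++ [s], ∃ y ∈ path ++ [s], stepB factory rows cols arrows x = Sum.inr y := by
  intro x hx
  have hxp : x ∈ path := by
    rcases List.mem_append.mp hx with h | h
    · exact h
    · rcases List.mem_singleton.mp h with rfl; exact hs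
  obtain ⟨i, hi, hxi⟩ := List.getElem_of_mem hxp
  have hi' : i + 1 < (path ++ [s]).length := by simp; omega
  have hR := List.IsChain.getElem hchain i hi'
  have hget : (path ++ [s])[i]'(by simp; omega) = x := by
    rw [List.getElem_append_left hi]; exact hxi
  refine ⟨(path ++ [s])[i + 1], List.getElem_mem hi', ?_⟩
  rwa [hget] at hR

-- pigeonhole: rows*cols distinct in-grid states exhaust the grid
lemma pigeon (rows cols : Int) (path : List (Int × Int)) (s : Int × Int)
    (hnd : path.Nodup) (hin : ∀ x ∈ path, InB rows cols x)
    (hlen : path.length = rows.toNat * cols.toNat) (hs : InB rows cols s) : s ∈ path := by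
  by_contra hns
  have hnd2 : (s :: path).Nodup := List.nodup_cons.mpr ⟨hns, hnd⟩
  have hsub : (s :: path).toFinset ⊆ (Finset.Ico 0 rows) ×ˢ (Finset.Ico 0 cols) := by
    intro x hx
    have hx' : x ∈ s :: path := List.mem_toFinset.mp hx
    have hb : InB rows cols x := by
      rcases List.mem_cons.mp hx' with rfl | h
      · exact hs
      · exact hin x h
    obtain ⟨h1, h2, h3, h4⟩ := hb
    simp [Finset.mem_product, Finset.mem_Ico]
    exact ⟨⟨h1, h2⟩, h3, h4⟩
  have hcard := Finset.card_le_card hsub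
  rw [List.toFinset_card_of_nodup hnd2] at hcard
  simp [Finset.card_product, Int.card_Ico, hlen] at hcard

-- the core invariant: with `path` the distinct in-grid states already walked (A's seen set,
-- in insertion order), chained by stepB up to the current state s, A's remaining loop equals
-- B's counter loop with n = rows*cols - |path| remaining rounds.
lemma mainLoop (factory : List String) (rows cols : Int) (arrows : PySem.Dict Char (Int × Int)) :
    ∀ (n : Nat) (path : List (Int × Int)) (s : Int × Int),
      List.IsChain (fun a b => stepB factory rows cols arrows a = Sum.inr b) (path ++ [s]) →
      path.Nodup → (∀ x ∈ path, InB rows cols x) → InB rows cols s →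
      path.length + n = rows.toNat * cols.toNat →
      runLoopA factory rows cols arrows (n + 1) path s.1 s.2 =
        runLoopB factory rows cols arrows n s := by
  intro n
  induction n with
  | zero =>
    intro path s hchain hnd hin hs hlen
    have hmem : s ∈ path := pigeon rows cols path s hnd hin (by omega) hs
    rw [runLoopA_succ]
    have : PySem.Set.contains path (s.1, s.2) = true := by
      rw [PySem.Set.contains_iff]; simpa using hmem
    simp only [this, if_true]
    rfl
  | succ n ih =>
    intro path s hchain hnd hin hs hlen
    rw [runLoopA_succ]
    by_cases hmem : s ∈ path
    · have hc : PySem.Set.contains path (s.1, s.2) = true := by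
        rw [PySem.Set.contains_iff]; simpa using hmem
      simp only [hc, if_true]
      exact (runLoopB_closed factory rows cols arrows (path ++ [s])
        (chain_closed factory rows cols arrows path s hchain hmem) (n + 1) s
        (by simp)).symm
    · have hc : PySem.Set.contains path (s.1, s.2) = false := by
        rw [Bool.eq_false_iff]
        intro h
        exact hmem (by simpa using (PySem.Set.contains_iff path (s.1, s.2)).mp h)
      simp only [hc, Bool.false_eq_true, if_false]
      have hpair : (s.1, s.2) = s := rfl
      rw [hpair]
      cases hstep : stepB factory rows cols arrows s with
      | inl res =>
        simp only [runLoopB, hstep]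
      | inr s' =>
        simp only [runLoopB, hstep]
        have hadd : PySem.Set.add path (s.1, s.2) = path ++ [s] := by
          simp only [PySem.Set.add, hpair, hc, Bool.false_eq_true, if_false]
        rw [hadd]
        apply ih (path ++ [s]) s'
        · exact List.IsChain.append hchain (by simp)
            (by simp; exact hstep)
        · rw [List.nodup_append]
          exact ⟨hnd, List.nodup_singleton _, by
            intro a ha b hb
            rcases List.mem_singleton.mp hb with rfl
            intro h
            exact hmem (h ▸ ha)⟩
        · intro x hx
          rcases List.mem_append.mp hx with h | h
          · exact hin x h
          · rcases List.mem_singleton.mp h with rfl; exact hs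
        · exact stepB_inr_inB factory rows cols arrows s s' hstep
        · simp; omega

-- ===== VERDICT (by name: the statement is the Claim_ definition above) =====
theorem run_factory_spec : Claim_equal_run_factory := by
  intro factory _ hpre
  unfold Spec_run_factory
  simp only [run_factory, run_factory_alt]
  obtain ⟨hne, hc, _⟩ := hpre
  have hcols : PySem.Str.len (PySem.List.pyGetD factory 0 "") =
      ((factory.headD "").toList.length : Int) := by
    rw [PySem.Str.len_eq]
    congr 1
    cases factory with
    | nil => exact absurd rfl hne
    | cons h t => simp [PySem.List.pyGetD_zero_cons]
  rw [hcols]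
  have hn : ((factory.length : Int) * ((factory.headD "").toList.length : Int)).toNat =
      (factory.length : Int).toNat * ((factory.headD "").toList.length : Int).toNat := by
    rw [← Nat.cast_mul, Int.toNat_natCast, Int.toNat_natCast, Int.toNat_natCast]
  rw [hn]
  apply mainLoop factory (factory.length : Int) ((factory.headD "").toList.length : Int) _
    _ [] (0, 0)
  · simp
  · simp
  · simp
  · refine ⟨le_refl 0, ?_, le_refl 0, ?_⟩
    · simp
      cases factory with
      | nil => exact absurd rfl hne
      | cons h t => simp
    · simpa using hc
  · simp
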